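-- pv_equiv track=rewrite | github.com/ftomei/creek | main.py | search_runoff_start
-- ===== SOURCE A (Python) =====
-- def search_runoff_start(w1, prec, step):
--     maxZeroPrec = int(1800 / step)
--     checkStart = True
--     startIndex = 0
--     zeroPrecCount = 0
--     for i in range(len(w1)):
--         if checkStart:
--             if w1[i] > 0:
--                 checkStart = False
--                 startIndex = i
--                 zeroPrecCount = 0
--         else:
--             if prec[i] == 0:
--                 zeroPrecCount += 1
--             else:
--                 if zeroPrecCount >= maxZeroPrec and w1[i] < 5:
--                     startIndex = i
--                 zeroPrecCount = 0
--     return startIndex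
-- ===== SOURCE B (Python) =====
-- def search_runoff_start(w1, prec, step):
--     maxZeroPrec = int(1800 / step)
--     n = len(w1)
--     start = 0
--     found = False
--     for i in range(n):
--         if w1[i] > 0:
--             start = i
--             found = True
--             break
--     if not found:
--         return 0
--     # right-to-left scan: the answer is the rightmost late low-runoff event, if any;
--     # the zero-precipitation run before a candidate is measured on demand
--     for i in range(n - 1, start, -1):
--         if prec[i] != 0 and w1[i] < 5:
--             j = i - 1
--             while j > start and prec[j] == 0:
--                 j -= 1
--             if i - 1 - j >= maxZeroPrec:
--                 return i
--     return start
-- ===== Notes on version B (the rewrite author's own statement) =====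
-- stated objective: alternative
-- what changed: Instead of A's single forward pass driven by a checkStart flag and a maintained zeroPrecCount counter, B finds the first positive-runoff index and then scans right-to-left with an early return, measuring each candidate's preceding zero-precipitation run on demand with an inner backward while loop; the rightmost qualifying event found this way equals the last update A's forward pass makes.
import Mathlib
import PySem

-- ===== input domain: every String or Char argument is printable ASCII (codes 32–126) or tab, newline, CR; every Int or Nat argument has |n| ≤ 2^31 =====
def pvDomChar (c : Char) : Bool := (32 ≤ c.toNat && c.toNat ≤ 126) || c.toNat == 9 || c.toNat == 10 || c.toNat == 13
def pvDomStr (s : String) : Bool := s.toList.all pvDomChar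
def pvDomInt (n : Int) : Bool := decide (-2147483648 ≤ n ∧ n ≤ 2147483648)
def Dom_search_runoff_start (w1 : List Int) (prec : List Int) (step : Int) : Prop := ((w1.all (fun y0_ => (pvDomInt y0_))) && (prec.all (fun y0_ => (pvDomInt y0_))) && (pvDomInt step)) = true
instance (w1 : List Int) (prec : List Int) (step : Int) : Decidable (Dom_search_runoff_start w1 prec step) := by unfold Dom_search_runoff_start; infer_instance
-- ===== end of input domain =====

-- B replaces A's forward flag-driven state machine by a right-to-left scan with early
-- exit that measures each zero-precipitation run on demand; objective: alternative.

-- ===== PORT A =====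
-- literal transliteration of A: one fold over range(len(w1)) with state
-- (checkStart, startIndex, zeroPrecCount); int(1800/step) is exact trunc division here (|step| ≤ 2^31)
def search_runoff_start (w1 : List Int) (prec : List Int) (step : Int) : Int :=
  let maxZeroPrec := PySem.Int.truncdiv 1800 step
  let st := (PySem.List.pyRange 0 (w1.length : Int) 1).foldl
    (fun (st : Bool × Int × Int) i =>
      if st.1 then
        if PySem.List.pyGetD w1 i 0 > 0 then (false, i, 0) else st
      else
        if PySem.List.pyGetD prec i 0 = 0 then (st.1, st.2.1, st.2.2 + 1)
        else if st.2.2 ≥ maxZeroPrec ∧ PySem.List.pyGetD w1 i 0 < 5 then (st.1, i, 0)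
        else (st.1, st.2.1, 0))
    (true, 0, 0)
  st.2.1

-- ===== PORT B =====
-- Source B's inner while loop: descend from j through zero-precipitation indices, stop
-- at start; the Nat fuel (j - start).toNat only makes the loop total, it is never hit early
def srsRunF (prec : List Int) (start : Int) : Nat -> Int -> Int
  | 0, j => j
  | Nat.succ f, j =>
    if start < j ∧ PySem.List.pyGetD prec j 0 = 0 then srsRunF prec start f (j - 1) else j

def srsRun (prec : List Int) (start : Int) (j : Int) : Int :=
  srsRunF prec start (j - start).toNat j

-- Source B's backward for-loop over range(n-1, start, -1) with its early returns,
-- fuel (i - start).toNat again only for totality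
def srsScanF (w1 prec : List Int) (m start : Int) : Nat -> Int -> Int
  | 0, _ => start
  | Nat.succ f, i =>
    if start < i then
      if PySem.List.pyGetD prec i 0 ≠ 0 ∧ PySem.List.pyGetD w1 i 0 < 5 then
        if i - 1 - srsRun prec start (i - 1) ≥ m then i
        else srsScanF w1 prec m start f (i - 1)
      else srsScanF w1 prec m start f (i - 1)
    else start

def srsScan (w1 prec : List Int) (m start : Int) (i : Int) : Int :=
  srsScanF w1 prec m start (i - start).toNat i

-- transliteration of Source B: a first linear search for the first positive runoff index
-- (return 0 if none), then the backward scan srsScan from the last index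
def search_runoff_start_alt (w1 : List Int) (prec : List Int) (step : Int) : Int :=
  let maxZeroPrec := PySem.Int.truncdiv 1800 step
  match ((PySem.List.enumerate w1 0).find? (fun p => decide (p.2 > 0))).map (·.1) with
  | none => 0
  | some s => srsScan w1 prec maxZeroPrec s ((w1.length : Int) - 1)

-- ===== PRECONDITION & SPEC =====
-- Pre_ excludes exactly where Python A raises: step = 0 (ZeroDivisionError in 1800/step),
-- and prec shorter than w1 while some element of w1[:-1] is positive (IndexError on prec[i]).
def Pre_search_runoff_start (w1 : List Int) (prec : List Int) (step : Int) : Prop :=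
  step ≠ 0 ∧ (w1.dropLast.any (fun v => decide (v > 0)) = true → w1.length ≤ prec.length)
instance (w1 : List Int) (prec : List Int) (step : Int) : Decidable (Pre_search_runoff_start w1 prec step) := by unfold Pre_search_runoff_start; infer_instance
def pvWitness_search_runoff_start : List Int × List Int × Int := ([0, 3, 1, 0, 2], [1, 0, 0, 2, 0], 900)

def Spec_search_runoff_start (w1 : List Int) (prec : List Int) (step : Int) (out : Int) : Prop := out = search_runoff_start_alt w1 prec step
instance (w1 : List Int) (prec : List Int) (step : Int) (out : Int) : Decidable (Spec_search_runoff_start w1 prec step out) := by unfold Spec_search_runoff_start; infer_instance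

-- ===== CLAIM (what is proved, stated in full; the proofs are below) =====
def Claim_equal_search_runoff_start : Prop := ∀ (w1 : List Int) (prec : List Int) (step : Int), Dom_search_runoff_start w1 prec step → Pre_search_runoff_start w1 prec step → Spec_search_runoff_start w1 prec step (search_runoff_start w1 prec step)

-- ===== LEMMAS AND PROOFS =====

-- B's first linear search equals findIdx? (shifted by the start offset)
theorem enum_find_eq (xs : List Int) (s0 : Int) :
    ((PySem.List.enumerate xs s0).find? (fun p => decide (p.2 > 0))).map (·.1)
      = (xs.findIdx? (fun v => decide (v > 0))).map (fun k => s0 + (k : Int)) := by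
  induction xs generalizing s0 with
  | nil => simp [PySem.List.enumerate_nil]
  | cons x xs ih =>
    rw [PySem.List.enumerate_cons, List.find?_cons, List.findIdx?_cons]
    by_cases hx : x > 0
    · simp [hx]
    · simp only [hx, decide_false, ih (s0 + 1)]
      cases List.findIdx? (fun v => decide (v > 0)) xs
      · simp
      · simp; ring

-- phase 0 of A: while no positive runoff has been seen, the state stays (true, 0, 0)
theorem phaseA0 (w1 prec : List Int) (m : Int) (a b : Int)
    (h : ∀ i : Int, a ≤ i → i < b → ¬ PySem.List.pyGetD w1 i 0 > 0) :
    (PySem.List.pyRange a b 1).foldl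
      (fun (st : Bool × Int × Int) i =>
        if st.1 then
          if PySem.List.pyGetD w1 i 0 > 0 then (false, i, 0) else st
        else
          if PySem.List.pyGetD prec i 0 = 0 then (st.1, st.2.1, st.2.2 + 1)
          else if st.2.2 ≥ m ∧ PySem.List.pyGetD w1 i 0 < 5 then (st.1, i, 0)
          else (st.1, st.2.1, 0))
      (true, 0, 0) = (true, 0, 0) := by
  by_cases hab : b ≤ a
  · rw [PySem.List.pyRange_one_eq_nil hab]; rfl
  · push Not at hab
    rw [PySem.List.pyRange_one_cons hab, List.foldl_cons]
    have h0 := h a le_rfl hab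
    simp only [if_neg h0]
    exact phaseA0 w1 prec m (a + 1) b (fun i hi hib => h i (by omega) hib)
termination_by (b - a).toNat
decreasing_by omega

-- once checkStart is false, A's step acts only on the (startIndex, count) pair
theorem phaseA2 (w1 prec : List Int) (m : Int) (l : List Int) (si z : Int) :
    l.foldl
      (fun (st : Bool × Int × Int) i =>
        if st.1 then
          if PySem.List.pyGetD w1 i 0 > 0 then (false, i, 0) else st
        else
          if PySem.List.pyGetD prec i 0 = 0 then (st.1, st.2.1, st.2.2 + 1)
          else if st.2.2 ≥ m ∧ PySem.List.pyGetD w1 i 0 < 5 then (st.1, i, 0)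
          else (st.1, st.2.1, 0))
      (false, si, z)
    = (false, l.foldl
        (fun (st : Int × Int) i =>
          if PySem.List.pyGetD prec i 0 = 0 then (st.1, st.2 + 1)
          else if st.2 ≥ m ∧ PySem.List.pyGetD w1 i 0 < 5 then (i, 0)
          else (st.1, 0))
        (si, z)) := by
  induction l generalizing si z with
  | nil => rfl
  | cons x l ih =>
    simp only [List.foldl_cons, Bool.false_eq_true, if_false]
    split_ifs <;> apply ih


-- targeted unfolding lemmas for B's loops
theorem srsScan_unfold (w1 prec : List Int) (m start i : Int) (h : start < i) :
    srsScan w1 prec m start i =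
      (if PySem.List.pyGetD prec i 0 ≠ 0 ∧ PySem.List.pyGetD w1 i 0 < 5 then
        if i - 1 - srsRun prec start (i - 1) ≥ m then i
        else srsScan w1 prec m start (i - 1)
      else srsScan w1 prec m start (i - 1)) := by
  unfold srsScan
  have hf : (i - start).toNat = (i - 1 - start).toNat + 1 := by omega
  rw [hf, srsScanF, if_pos h]

theorem srsScan_stop (w1 prec : List Int) (m start i : Int) (h : ¬ start < i) :
    srsScan w1 prec m start i = start := by
  unfold srsScan
  have hf : (i - start).toNat = 0 := by omega
  rw [hf, srsScanF]

theorem srsRun_go (prec : List Int) (start j : Int) (h1 : start < j)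
    (h2 : PySem.List.pyGetD prec j 0 = 0) :
    srsRun prec start j = srsRun prec start (j - 1) := by
  unfold srsRun
  have hf : (j - start).toNat = (j - 1 - start).toNat + 1 := by omega
  rw [hf, srsRunF, if_pos ⟨h1, h2⟩]

theorem srsRun_stop (prec : List Int) (start j : Int)
    (h : ¬ (start < j ∧ PySem.List.pyGetD prec j 0 = 0)) :
    srsRun prec start j = j := by
  unfold srsRun
  rcases hf : (j - start).toNat with _ | f
  · rw [srsRunF]
  · rw [srsRunF, if_neg h]

-- A's forward pair-fold over range(start+1, b) computes exactly B's backward scan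
-- from b-1, and its counter is the zero-run length b-1 - srsRun (b-1)
theorem phase2_eq (w1 prec : List Int) (m start b : Int) (hb : start + 1 ≤ b) :
    (PySem.List.pyRange (start + 1) b 1).foldl
      (fun (st : Int × Int) i =>
        if PySem.List.pyGetD prec i 0 = 0 then (st.1, st.2 + 1)
        else if st.2 ≥ m ∧ PySem.List.pyGetD w1 i 0 < 5 then (i, 0)
        else (st.1, 0))
      (start, 0)
    = (srsScan w1 prec m start (b - 1), (b - 1) - srsRun prec start (b - 1)) := by
  obtain ⟨t, ht⟩ : ∃ t : ℕ, b = start + 1 + t := ⟨(b - start - 1).toNat, by omega⟩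
  subst ht
  clear hb
  induction t with
  | zero =>
    rw [PySem.List.pyRange_one_eq_nil (by push_cast; omega), List.foldl_nil]
    have h1 : ¬ start < start + 1 + ((0:ℕ):Int) - 1 := by push_cast; omega
    rw [srsScan_stop w1 prec m start _ h1, srsRun_stop prec start _ (fun h => h1 h.1)]
    simp only [Prod.mk.injEq]
    exact ⟨trivial, by omega⟩
  | succ t ih =>
    rw [PySem.List.pyRange_one_append (start+1) (start + 1 + ((t:ℕ):Int)) (start + 1 + ((t+1:ℕ):Int)) (by omega) (by push_cast; omega),
      List.foldl_append, ih,
      PySem.List.pyRange_one_cons (by push_cast; omega),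
      PySem.List.pyRange_one_eq_nil (by push_cast; omega), List.foldl_cons, List.foldl_nil]
    have hii : start + 1 + ((t+1:ℕ):Int) - 1 = start + 1 + ((t:ℕ):Int) := by push_cast; omega
    rw [hii]
    set i : Int := start + 1 + ((t:ℕ):Int) with hidef
    have hlt : start < i := by omega
    rw [srsScan_unfold w1 prec m start i hlt]
    by_cases hp : PySem.List.pyGetD prec i 0 = 0
    · rw [if_pos hp, srsRun_go prec start i hlt hp, if_neg (fun h => h.1 hp)]
      simp only [Prod.mk.injEq]
      exact ⟨trivial, by omega⟩
    · rw [if_neg hp, srsRun_stop prec start i (fun h => hp h.2)]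
      by_cases hw : PySem.List.pyGetD w1 i 0 < 5
      · by_cases hm : i - 1 - srsRun prec start (i - 1) ≥ m
        · rw [if_pos ⟨hm, hw⟩, if_pos ⟨hp, hw⟩, if_pos hm]
          simp only [Prod.mk.injEq]
          exact ⟨trivial, by omega⟩
        · rw [if_neg (fun h => hm h.1), if_pos ⟨hp, hw⟩, if_neg hm]
          simp only [Prod.mk.injEq]
          exact ⟨trivial, by omega⟩
      · rw [if_neg (fun h => hw h.2), if_neg (fun h => hw h.2)]
        simp only [Prod.mk.injEq]
        exact ⟨trivial, by omega⟩

-- ===== VERDICT (by name: the statement is the Claim_ definition above) =====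
theorem search_runoff_start_spec : Claim_equal_search_runoff_start := by
  intro w1 prec step _ _
  unfold Spec_search_runoff_start search_runoff_start search_runoff_start_alt
  simp only [enum_find_eq]
  rcases hf : w1.findIdx? (fun v => decide (v > 0)) with _ | k
  · -- no positive element: A's fold never leaves phase 0
    have hall := List.findIdx?_eq_none_iff.mp hf
    rw [phaseA0 w1 prec (PySem.Int.truncdiv 1800 step) 0 (w1.length : Int)
      (by
        intro i hi hib hpos
        have hm : PySem.List.pyGetD w1 i 0 ∈ w1 :=
          PySem.List.pyGetD_mem w1 0 (by simp [PySem.Raise.InRange]; omega)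
        have := hall _ hm
        simp at this
        omega)]
    simp
  · -- first positive element at index k
    obtain ⟨hk, hpk, hbefore⟩ := List.findIdx?_eq_some_iff_getElem.mp hf
    rw [PySem.List.pyRange_one_append 0 (k : Int) (w1.length : Int) (by omega) (by exact_mod_cast hk.le),
      List.foldl_append,
      phaseA0 w1 prec (PySem.Int.truncdiv 1800 step) 0 (k : Int)
        (by
          intro i hi hib hpos
          have hilt : i.toNat < k := by omega
          have : PySem.List.pyGetD w1 i 0 = w1[i.toNat] :=
            PySem.List.pyGetD_eq_getElem w1 0 hi (by omega)
          have hb := hbefore i.toNat hilt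
          simp only [decide_eq_true_eq] at hb
          rw [this] at hpos
          exact hb hpos),
      PySem.List.pyRange_one_cons (by exact_mod_cast hk),
      List.foldl_cons]
    have hget : PySem.List.pyGetD w1 (k : Int) 0 = w1[k] :=
      PySem.List.pyGetD_eq_getElem w1 0 (by omega) (by exact_mod_cast hk)
    simp only [decide_eq_true_eq] at hpk
    simp only [hget, if_pos hpk, if_true]
    rw [phaseA2, phase2_eq w1 prec (PySem.Int.truncdiv 1800 step) (k : Int) (w1.length : Int) (by exact_mod_cast hk)]
    simp
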